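-- pv_equiv track=rewrite | github.com/galikat131131/-met-map-api | scripts/compute_adjacency.py | build_adjacency_lists
-- ===== SOURCE A (Python) =====
-- def build_adjacency_lists(probes: dict) -> dict[str, list[int]]:
--     """Turn the symmetric pair map into per-gallery neighbor lists."""
--     adj: dict[int, set[int]] = {}
--     for key, entry in probes.items():
--         if not entry.get("adjacent"):
--             continue
--         a, b = entry["from"], entry["to"]
--         adj.setdefault(a, set()).add(b)
--         adj.setdefault(b, set()).add(a)
--     return {str(g): sorted(ns) for g, ns in sorted(adj.items())}
-- ===== SOURCE B (Python) =====
-- def build_adjacency_lists(probes: dict) -> dict[str, list[int]]: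
--     """Turn the symmetric pair map into per-gallery neighbor lists."""
--     edges = set()
--     for entry in probes.values():
--         if entry.get("adjacent"):
--             a, b = entry["from"], entry["to"]
--             edges.add((a, b))
--             edges.add((b, a))
--     nodes = sorted({a for a, _ in edges})
--     return {str(g): sorted(b for a, b in edges if a == g) for g in nodes}
-- ===== Notes on version B (the rewrite author's own statement) =====
-- stated objective: alternative
-- what changed: B replaces A's incrementally built dict of neighbor sets with a flat set of directed edges collected in one pass, from which each sorted gallery's neighbor list is obtained by a per-node scan of the edge set; grouping happens by rescanning rather than by keyed insertion.
import Mathlib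
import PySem

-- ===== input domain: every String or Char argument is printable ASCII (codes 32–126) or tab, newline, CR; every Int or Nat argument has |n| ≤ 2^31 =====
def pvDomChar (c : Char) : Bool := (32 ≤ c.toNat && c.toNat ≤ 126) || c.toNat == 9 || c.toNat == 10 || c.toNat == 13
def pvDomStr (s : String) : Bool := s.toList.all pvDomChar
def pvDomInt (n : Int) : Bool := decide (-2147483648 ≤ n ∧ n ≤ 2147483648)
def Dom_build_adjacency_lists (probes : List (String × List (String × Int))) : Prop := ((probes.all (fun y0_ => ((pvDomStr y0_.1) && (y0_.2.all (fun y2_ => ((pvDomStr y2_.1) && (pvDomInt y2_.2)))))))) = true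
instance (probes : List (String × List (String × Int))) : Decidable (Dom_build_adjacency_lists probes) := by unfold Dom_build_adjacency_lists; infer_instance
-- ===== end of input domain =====

-- B trades A's incrementally built dict of neighbor sets for a flat set of directed edges plus a
-- per-node rescan; same values, no speed claim (objective: alternative).

-- ===== PORT A =====
-- 'adj.setdefault(a, set()).add(b)' is exactly Dict.modify a ∅ (·.add b) (d[k] = f(d.get(k, dflt))).
-- 'sorted(adj.items())' is ported as sorting by the Int key only: dict keys are distinct, so
-- Python never reaches the (set) second component of the tuples when comparing.
def build_adjacency_lists (probes : List (String × List (String × Int))) : List (String × List Int) :=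
  let adj : PySem.Dict Int (PySem.Set Int) :=
    (PySem.Dict.ofList probes).items.foldl (fun adj kv =>
      let entry := PySem.Dict.ofList kv.2
      match entry.get? "adjacent" with
      | none => adj
      | some v =>
        if v = 0 then adj
        else
          -- entry["from"], entry["to"]: Python raises KeyError when missing (excluded by Pre_)
          match entry.get? "from", entry.get? "to" with
          | some a, some b =>
              (adj.modify a PySem.Set.empty (fun s => PySem.Set.add s b)).modify b
                PySem.Set.empty (fun s => PySem.Set.add s a)
          | _, _ => adj) PySem.Dict.empty
  (PySem.List.sorted adj.items (fun p => p.1) false).map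
    (fun p => (PySem.Int.toStr p.1, PySem.List.sorted p.2 (fun x => x) false))

-- ===== PORT B =====
def build_adjacency_lists_alt (probes : List (String × List (String × Int))) : List (String × List Int) :=
  let edges : PySem.Set (Int × Int) :=
    (PySem.Dict.ofList probes).values.foldl (fun es entryList =>
      let entry := PySem.Dict.ofList entryList
      -- 'if not entry.get("adjacent")': values are ints, so truthy = entry.get("adjacent", 0) ≠ 0
      if entry.getD "adjacent" 0 == 0 then es
      -- entry["from"] / entry["to"] raise KeyError when absent (excluded by Pre_); guard totalizes
      else if entry.contains "from" && entry.contains "to" then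
        PySem.Set.add (PySem.Set.add es (entry.getD "from" 0, entry.getD "to" 0))
          (entry.getD "to" 0, entry.getD "from" 0)
      else es) PySem.Set.empty
  -- sorted({a for a, _ in edges}); sorted of the distinct first components is order-independent
  let nodes := PySem.List.sorted (PySem.Set.ofList (edges.map (fun e => e.1))) (fun x => x) false
  nodes.map (fun g =>
    (PySem.Int.toStr g,
     PySem.List.sorted ((edges.filter (fun e => e.1 == g)).map (fun e => e.2)) (fun x => x) false))

-- ===== PRECONDITION & SPEC =====
-- Pre_ excludes exactly the inputs on which Python's A raises KeyError: an entry whose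
-- "adjacent" value is truthy (non-zero) but which lacks a "from" or "to" key.
def Pre_build_adjacency_lists (probes : List (String × List (String × Int))) : Prop :=
  ∀ kv ∈ (PySem.Dict.ofList probes).items,
    (PySem.Dict.ofList kv.2).getD "adjacent" 0 ≠ 0 →
      (PySem.Dict.ofList kv.2).contains "from" = true ∧
      (PySem.Dict.ofList kv.2).contains "to" = true
instance (probes : List (String × List (String × Int))) : Decidable (Pre_build_adjacency_lists probes) := by
  unfold Pre_build_adjacency_lists; infer_instance
def pvWitness_build_adjacency_lists : (List (String × List (String × Int))) :=
  [("p1", [("adjacent", 1), ("from", 2), ("to", 3)]), ("p2", [("adjacent", 0)])]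
def Spec_build_adjacency_lists (probes : List (String × List (String × Int))) (out : List (String × List Int)) : Prop := out = build_adjacency_lists_alt probes
instance (probes : List (String × List (String × Int))) (out : List (String × List Int)) : Decidable (Spec_build_adjacency_lists probes out) := by unfold Spec_build_adjacency_lists; infer_instance

-- ===== CLAIM (what is proved, stated in full; the proofs are below) =====
def Claim_equal_build_adjacency_lists : Prop := ∀ (probes : List (String × List (String × Int))), Dom_build_adjacency_lists probes → Pre_build_adjacency_lists probes → Spec_build_adjacency_lists probes (build_adjacency_lists probes)

-- ===== LEMMAS AND PROOFS =====

-- proof-only helpers: the flat list of directed edges contributed by the qualifying entries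
def pvExtract (entry : List (String × Int)) : List (Int × Int) :=
  match (PySem.Dict.ofList entry).get? "adjacent" with
  | none => []
  | some v =>
    if v = 0 then []
    else
      match (PySem.Dict.ofList entry).get? "from", (PySem.Dict.ofList entry).get? "to" with
      | some a, some b => [(a, b), (b, a)]
      | _, _ => []

def pvE (probes : List (String × List (String × Int))) : List (Int × Int) :=
  ((PySem.Dict.ofList probes).values).flatMap pvExtract

def pvStepA (d : PySem.Dict Int (PySem.Set Int)) (e : Int × Int) : PySem.Dict Int (PySem.Set Int) :=
  d.modify e.1 PySem.Set.empty (fun s => PySem.Set.add s e.2)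

def pvAdj (probes : List (String × List (String × Int))) : PySem.Dict Int (PySem.Set Int) :=
  (pvE probes).foldl pvStepA PySem.Dict.empty

def pvS (probes : List (String × List (String × Int))) : PySem.Set (Int × Int) :=
  PySem.Set.ofList (pvE probes)

lemma pv_bodyA (adj : PySem.Dict Int (PySem.Set Int)) (kv : String × List (String × Int)) :
    (let entry := PySem.Dict.ofList kv.2
     match entry.get? "adjacent" with
     | none => adj
     | some v =>
       if v = 0 then adj
       else
         match entry.get? "from", entry.get? "to" with
         | some a, some b =>
             (adj.modify a PySem.Set.empty (fun s => PySem.Set.add s b)).modify b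
               PySem.Set.empty (fun s => PySem.Set.add s a)
         | _, _ => adj)
    = (pvExtract kv.2).foldl pvStepA adj := by
  cases h : (PySem.Dict.ofList kv.2).get? "adjacent" with
  | none => simp [pvExtract, h]
  | some v =>
    by_cases hv : v = 0
    · simp [pvExtract, h, hv]
    · cases hf : (PySem.Dict.ofList kv.2).get? "from" <;>
        cases ht : (PySem.Dict.ofList kv.2).get? "to" <;>
        simp [pvExtract, h, hv, hf, ht, pvStepA]

lemma pvAdj_eq (probes : List (String × List (String × Int))) :
    ((PySem.Dict.ofList probes).items.foldl (fun adj kv =>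
      let entry := PySem.Dict.ofList kv.2
      match entry.get? "adjacent" with
      | none => adj
      | some v =>
        if v = 0 then adj
        else
          match entry.get? "from", entry.get? "to" with
          | some a, some b =>
              (adj.modify a PySem.Set.empty (fun s => PySem.Set.add s b)).modify b
                PySem.Set.empty (fun s => PySem.Set.add s a)
          | _, _ => adj) PySem.Dict.empty) = pvAdj probes := by
  unfold pvAdj pvE
  rw [List.foldl_flatMap]
  simp only [PySem.Dict.values]
  rw [List.foldl_map]
  exact PySem.List.foldl_congr_mem _ _ _ _ (fun adj kv _ => pv_bodyA adj kv)

lemma A_eq (probes : List (String × List (String × Int))) :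
    build_adjacency_lists probes =
      (PySem.List.sorted (pvAdj probes).items (fun p => p.1) false).map
        (fun p => (PySem.Int.toStr p.1, PySem.List.sorted p.2 (fun x => x) false)) := by
  simp only [build_adjacency_lists]
  rw [pvAdj_eq]

lemma pv_bodyB (es : PySem.Set (Int × Int)) (entryList : List (String × Int)) :
    (let entry := PySem.Dict.ofList entryList
     if entry.getD "adjacent" 0 == 0 then es
     else if entry.contains "from" && entry.contains "to" then
       PySem.Set.add (PySem.Set.add es (entry.getD "from" 0, entry.getD "to" 0))
         (entry.getD "to" 0, entry.getD "from" 0)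
     else es)
    = (pvExtract entryList).foldl PySem.Set.add es := by
  cases h : (PySem.Dict.ofList entryList).get? "adjacent" with
  | none =>
    simp [pvExtract, h, PySem.Dict.getD_eq_get?_getD]
  | some v =>
    by_cases hv : v = 0 <;>
      cases hf : (PySem.Dict.ofList entryList).get? "from" <;>
        cases ht : (PySem.Dict.ofList entryList).get? "to" <;>
        simp [pvExtract, h, hv, hf, ht, PySem.Dict.getD_eq_get?_getD,
          PySem.Dict.contains_eq_isSome_get?]

lemma pvEdges_eq (probes : List (String × List (String × Int))) :
    ((PySem.Dict.ofList probes).values.foldl (fun es entryList =>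
      let entry := PySem.Dict.ofList entryList
      if entry.getD "adjacent" 0 == 0 then es
      else if entry.contains "from" && entry.contains "to" then
        PySem.Set.add (PySem.Set.add es (entry.getD "from" 0, entry.getD "to" 0))
          (entry.getD "to" 0, entry.getD "from" 0)
      else es) PySem.Set.empty) = pvS probes := by
  unfold pvS pvE
  rw [PySem.Set.ofList_eq_foldl, List.foldl_flatMap]
  exact PySem.List.foldl_congr_mem _ _ _ _ (fun es en _ => pv_bodyB es en)

lemma B_eq (probes : List (String × List (String × Int))) :
    build_adjacency_lists_alt probes =
      (PySem.List.sorted (PySem.Set.ofList ((pvS probes).map (fun e => e.1))) (fun x => x) false).map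
        (fun g =>
          (PySem.Int.toStr g,
           PySem.List.sorted (((pvS probes).filter (fun e => e.1 == g)).map (fun e => e.2))
             (fun x => x) false)) := by
  simp only [build_adjacency_lists_alt]
  rw [pvEdges_eq]

lemma pv_mem_getD (E : List (Int × Int)) (d : PySem.Dict Int (PySem.Set Int)) (g b : Int) :
    b ∈ (E.foldl pvStepA d).getD g PySem.Set.empty ↔
      b ∈ d.getD g PySem.Set.empty ∨ (g, b) ∈ E := by
  induction E generalizing d with
  | nil => simp
  | cons e t ih =>
    rw [List.foldl_cons, ih]
    simp only [pvStepA, PySem.Dict.getD_modify]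
    by_cases hg : g = e.1
    · subst hg
      simp [PySem.Set.mem_add, Prod.ext_iff]
      tauto
    · simp only [if_neg hg, List.mem_cons, Prod.ext_iff]
      tauto

lemma pv_nodup_getD (E : List (Int × Int)) (d : PySem.Dict Int (PySem.Set Int))
    (h : ∀ g, (d.getD g PySem.Set.empty).Nodup) (g : Int) :
    ((E.foldl pvStepA d).getD g PySem.Set.empty).Nodup := by
  induction E generalizing d with
  | nil => exact h g
  | cons e t ih =>
    rw [List.foldl_cons]
    refine ih _ (fun g' => ?_)
    simp only [pvStepA, PySem.Dict.getD_modify]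
    split_ifs with hg
    · exact PySem.Set.nodup_add _ _ (h e.1)
    · exact h g'

lemma pv_keys_adj (probes : List (String × List (String × Int))) :
    (pvAdj probes).keys = PySem.Set.ofList ((pvE probes).map (fun e => e.1)) := by
  unfold pvAdj pvStepA
  have h := PySem.Dict.keys_foldl_modify_key (pvE probes) (fun e : Int × Int => e.1)
    PySem.Set.empty (fun _ e => fun s => PySem.Set.add s e.2) PySem.Dict.empty
  exact h.trans (by rw [PySem.Dict.keys_empty, PySem.Set.update_nil_left])

lemma pv_nodup_keys_adj (probes : List (String × List (String × Int))) :
    (pvAdj probes).keys.Nodup := by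
  rw [pv_keys_adj]; exact PySem.Set.nodup_ofList _

lemma pv_sorted_keys_eq (probes : List (String × List (String × Int))) :
    PySem.List.sorted (pvAdj probes).keys (fun x => x) false =
      PySem.List.sorted (PySem.Set.ofList ((pvS probes).map (fun e => e.1))) (fun x => x) false := by
  rw [PySem.List.sorted_id_eq_sorted_id_iff_perm]
  refine (List.perm_ext_iff_of_nodup (pv_nodup_keys_adj probes) (PySem.Set.nodup_ofList _)).mpr
    (fun g => ?_)
  rw [pv_keys_adj]
  unfold pvS
  simp [PySem.Set.mem_ofList, List.mem_map]

lemma pv_snd_eq (probes : List (String × List (String × Int))) (g : Int) :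
    PySem.List.sorted ((pvAdj probes).getD g PySem.Set.empty) (fun x => x) false =
      PySem.List.sorted (((pvS probes).filter (fun e => e.1 == g)).map (fun e => e.2))
        (fun x => x) false := by
  have hnd1 : ((pvAdj probes).getD g PySem.Set.empty).Nodup := by
    unfold pvAdj
    exact pv_nodup_getD _ _ (fun g' => by simp [PySem.Dict.getD_empty, PySem.Set.empty]) g
  have hndS : (pvS probes).Nodup := PySem.Set.nodup_ofList _
  have hnd2 : (((pvS probes).filter (fun e => e.1 == g)).map (fun e => e.2)).Nodup := by
    refine (hndS.filter _).map_on ?_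
    intro x hx y hy hxy
    have hx1 : x.1 = g := by simpa using (List.mem_filter.mp hx).2
    have hy1 : y.1 = g := by simpa using (List.mem_filter.mp hy).2
    exact Prod.ext (hx1.trans hy1.symm) hxy
  rw [PySem.List.sorted_id_eq_sorted_id_iff_perm]
  refine (List.perm_ext_iff_of_nodup hnd1 hnd2).mpr (fun b => ?_)
  have hL : b ∈ (pvAdj probes).getD g PySem.Set.empty ↔ (g, b) ∈ pvE probes := by
    unfold pvAdj
    rw [pv_mem_getD]
    simp [PySem.Dict.getD_empty, PySem.Set.empty]
  rw [hL]
  unfold pvS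
  constructor
  · intro h
    exact List.mem_map.mpr ⟨(g, b), List.mem_filter.mpr ⟨(PySem.Set.mem_ofList _ _).mpr h, by simp⟩, rfl⟩
  · rintro h
    obtain ⟨e, he, hb⟩ := List.mem_map.mp h
    obtain ⟨heS, hg⟩ := List.mem_filter.mp he
    have : e = (g, b) := Prod.ext (by simpa using hg) hb
    exact (PySem.Set.mem_ofList _ _).mp (this ▸ heS)

lemma pv_sorted_map_fst (K : List Int) (hK : K.Nodup) (v : Int → PySem.Set Int) :
    PySem.List.sorted (K.map (fun g => (g, v g))) (fun p => p.1) false =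
      (PySem.List.sorted K (fun x => x) false).map (fun g => (g, v g)) := by
  refine PySem.List.sorted_eq_of_perm_of_pairwise_lt _ _ _
    ((PySem.List.sorted_perm K (fun x => x) false).map _) ?_
  rw [List.pairwise_map]
  have h1 : (PySem.List.sorted K (fun x => x) false).Pairwise (· ≤ ·) :=
    PySem.List.sorted_pairwise K (fun x => x)
  have h2 : (PySem.List.sorted K (fun x => x) false).Nodup :=
    ((PySem.List.sorted_perm K (fun x => x) false).nodup_iff).mpr hK
  exact (h1.and h2).imp (fun h => lt_of_le_of_ne h.1 h.2)

-- ===== VERDICT (by name: the statement is the Claim_ definition above) =====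
theorem build_adjacency_lists_spec : Claim_equal_build_adjacency_lists := by
  intro probes _ _
  unfold Spec_build_adjacency_lists
  rw [A_eq, B_eq]
  rw [PySem.Dict.items_eq_map_keys (pvAdj probes) (pv_nodup_keys_adj probes) PySem.Set.empty]
  rw [pv_sorted_map_fst _ (pv_nodup_keys_adj probes), List.map_map, pv_sorted_keys_eq]
  refine List.map_congr_left (fun g hg => ?_)
  show (PySem.Int.toStr g,
    PySem.List.sorted ((pvAdj probes).getD g PySem.Set.empty) (fun x => x) false) = _
  rw [pv_snd_eq]
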